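-- pv_equiv track=rewrite | github.com/guihao-liang/pre-commit-cpp | pre_commit_cpp/clang_format_hook.py | _split_files_from_cmd
-- ===== SOURCE A (Python) =====
-- def _split_files_from_cmd(cmd):
--     file_names = list()
--     for (ii, item) in enumerate(reversed(cmd)):
--         if item.startswith("-"):
--             # modify cmd inplace
--             return cmd[: len(cmd) - ii], file_names
--         else:
--             file_names.insert(0, item)
--
--     return list(), file_names
-- ===== SOURCE B (Python) =====
-- def _split_files_from_cmd(cmd):
--     boundary = 0
--     for i, item in enumerate(cmd):
--         if item.startswith("-"):
--             boundary = i + 1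
--     return cmd[:boundary], cmd[boundary:]
-- ===== Notes on version B (the rewrite author's own statement) =====
-- stated objective: faster
-- what changed: Replaces A's reversed early-return scan that accumulates file names via quadratic insert(0) with a forward pass computing the boundary index after the last dash-prefixed argument, followed by two slices.
import Mathlib
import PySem

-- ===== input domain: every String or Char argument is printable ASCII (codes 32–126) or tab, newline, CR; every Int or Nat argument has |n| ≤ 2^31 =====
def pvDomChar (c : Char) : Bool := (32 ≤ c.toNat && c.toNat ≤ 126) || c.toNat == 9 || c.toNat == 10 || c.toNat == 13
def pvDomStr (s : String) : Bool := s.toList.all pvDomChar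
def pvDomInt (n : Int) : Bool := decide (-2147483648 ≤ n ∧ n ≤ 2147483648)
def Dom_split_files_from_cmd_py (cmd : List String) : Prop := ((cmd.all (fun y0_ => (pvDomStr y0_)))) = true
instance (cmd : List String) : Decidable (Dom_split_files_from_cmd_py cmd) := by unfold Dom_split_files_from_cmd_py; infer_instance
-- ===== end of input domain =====

-- B replaces A's reversed early-return scan with insert(0) accumulation by a forward
-- boundary computation followed by two slices, avoiding quadratic insert(0) accumulation (objective: faster).


-- ===== PORT A =====
-- loop over enumerate(reversed(cmd)): ii is the running index, fns the file_names
-- accumulator (insert(0, item) = prepend); early return yields cmd[: len(cmd) - ii].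
def splitGoA (cmd : List String) : List String → Nat → List String → List String × List String
  | [], _, fns => ([], fns)
  | item :: rest, ii, fns =>
    if PySem.Str.startswith item "-" then
      (PySem.List.slice cmd none (some ((cmd.length : Int) - (ii : Int))), fns)
    else
      splitGoA cmd rest (ii + 1) (item :: fns)

def split_files_from_cmd_py (cmd : List String) : List String × List String :=
  splitGoA cmd cmd.reverse 0 []

-- ===== PORT B =====
-- forward pass: boundary = 1 + index of the last dash-prefixed item (0 if none), then two slices.
def split_files_from_cmd_py_alt (cmd : List String) : List String × List String :=
  let boundary : Int :=
    (PySem.List.enumerate cmd).foldl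
      (fun b p => if PySem.Str.startswith p.2 "-" then p.1 + 1 else b) 0
  (PySem.List.slice cmd none (some boundary), PySem.List.slice cmd (some boundary) none)

-- ===== PRECONDITION & SPEC =====
def Spec_split_files_from_cmd_py (cmd : List String) (out : List String × List String) : Prop := out = split_files_from_cmd_py_alt cmd
instance (cmd : List String) (out : List String × List String) : Decidable (Spec_split_files_from_cmd_py cmd out) := by unfold Spec_split_files_from_cmd_py; infer_instance

-- ===== CLAIM (what is proved, stated in full; the proofs are below) =====
def Claim_equal_split_files_from_cmd_py : Prop := ∀ (cmd : List String), Dom_split_files_from_cmd_py cmd → Spec_split_files_from_cmd_py cmd (split_files_from_cmd_py cmd)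

-- ===== LEMMAS AND PROOFS =====

-- shared description of the boundary: number of elements up to and including the last dash item
-- (PySem.Chars.startswith s.toList ['-'] is definitionally PySem.Str.startswith s "-", the simp normal form)
def dashBoundary (cmd : List String) : Nat :=
  match cmd.reverse.findIdx? (fun s => PySem.Chars.startswith s.toList ['-']) with
  | some k => cmd.length - k
  | none => 0

lemma findIdx?_lt {xs : List String} {p : String → Bool} {k : Nat}
    (h : xs.findIdx? p = some k) : k < xs.length :=
  (List.findIdx?_eq_some_iff_findIdx_eq.mp h).1

-- A's loop, fully characterised by the first dash position in the list it still has to process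
lemma splitGoA_eq (cmd : List String) (r : List String) (ii : Nat) (fns : List String) :
    splitGoA cmd r ii fns =
      match r.findIdx? (fun s => PySem.Chars.startswith s.toList ['-']) with
      | some k => (PySem.List.slice cmd none (some ((cmd.length : Int) - ((ii + k : Nat) : Int))),
                   (r.take k).reverse ++ fns)
      | none => ([], r.reverse ++ fns) := by
  induction r generalizing ii fns with
  | nil => simp [splitGoA]
  | cons x xs ih =>
    by_cases hx : PySem.Chars.startswith x.toList ['-'] = true
    · simp [splitGoA, hx, List.findIdx?_cons]
    · simp only [splitGoA, List.findIdx?_cons]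
      simp only [show ("-" : String).toList = ['-'] from rfl, PySem.Str.startswith, hx,
        if_false, Bool.false_eq_true]
      rw [ih]
      cases h : xs.findIdx? (fun s => PySem.Chars.startswith s.toList ['-']) with
      | none => simp
      | some k =>
        simp only [Option.map_some, List.take_succ_cons, List.reverse_cons, List.append_assoc,
          List.singleton_append]
        congr 2
        simp only [Option.some.injEq]
        omega

-- B's fold computes dashBoundary
lemma foldB_eq (cmd : List String) :
    (PySem.List.enumerate cmd).foldl
      (fun b p => if PySem.Str.startswith p.2 "-" then p.1 + 1 else b) 0
      = ((dashBoundary cmd : Nat) : Int) := by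
  induction cmd using List.reverseRecOn with
  | nil => simp [dashBoundary]
  | append_singleton xs x ih =>
    rw [PySem.List.enumerate_append, List.foldl_append, ih]
    by_cases hx : PySem.Chars.startswith x.toList ['-'] = true
    · simp [PySem.List.enumerate, hx, dashBoundary, List.reverse_append, List.findIdx?_cons]
    · simp only [PySem.List.enumerate, List.foldl_cons, List.foldl_nil,
        dashBoundary, List.reverse_append, List.reverse_cons, List.reverse_nil,
        List.nil_append, List.cons_append, List.findIdx?_cons]
      simp only [show ("-" : String).toList = ['-'] from rfl, PySem.Str.startswith, hx,
        if_false, Bool.false_eq_true]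
      cases h : xs.reverse.findIdx? (fun s => PySem.Chars.startswith s.toList ['-']) with
      | none => simp
      | some k =>
        have hklt : k < xs.length := by simpa using findIdx?_lt h
        simp only [Option.map_some, List.length_append, List.length_cons, List.length_nil]
        omega

-- ===== VERDICT (by name: the statement is the Claim_ definition above) =====
theorem split_files_from_cmd_py_spec : Claim_equal_split_files_from_cmd_py := by
  intro cmd _
  show split_files_from_cmd_py cmd = split_files_from_cmd_py_alt cmd
  unfold split_files_from_cmd_py split_files_from_cmd_py_alt
  rw [foldB_eq, splitGoA_eq]
  dsimp only
  rw [PySem.List.slice_to_natCast, PySem.List.slice_from_natCast]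
  cases h : cmd.reverse.findIdx? (fun s => PySem.Chars.startswith s.toList ['-']) with
  | none =>
    have hb : dashBoundary cmd = 0 := by unfold dashBoundary; rw [h]
    simp [hb]
  | some k =>
    have hklt : k < cmd.length := by simpa using findIdx?_lt h
    have hb : dashBoundary cmd = cmd.length - k := by unfold dashBoundary; rw [h]
    simp only [Nat.zero_add, hb, Prod.mk.injEq]
    constructor
    · have hc : ((cmd.length : Int) - (k : Int)) = ((cmd.length - k : Nat) : Int) := by omega
      rw [hc, PySem.List.slice_to_natCast]
    · rw [List.reverse_take]
      simp
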